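-- pv_equiv track=rewrite | github.com/devon-smith/clinical_Trial_Matching | condition_followups.py | _parse_choice
-- ===== SOURCE A (Python) =====
-- from typing import Any, Dict, List, Optional, Tuple
--
-- def _parse_choice(text: str, choices: List[str]) -> Optional[str]:
--     low = text.lower()
--     # Exact match first
--     for choice in choices:
--         if choice.lower() == low:
--             return choice
--     # Substring match — longest first to avoid "I" matching before "III"
--     sorted_choices = sorted(choices, key=len, reverse=True)
--     for choice in sorted_choices:
--         if choice.lower() in low:
--             return choice
--     # Return raw text as fallback
--     return text
-- ===== SOURCE B (Python) =====
-- from typing import List, Optional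
--
-- def _parse_choice(text: str, choices: List[str]) -> Optional[str]:
--     low = text.lower()
--     # Exact match first
--     for choice in choices:
--         if choice.lower() == low:
--             return choice
--     # Substring match: single max-tracking scan; strict '>' keeps the earliest
--     # choice among equal-length matches, and longer matches beat shorter ones.
--     best, best_len = None, -1
--     for choice in choices:
--         if len(choice) > best_len and choice.lower() in low:
--             best, best_len = choice, len(choice)
--     return best if best is not None else text
-- ===== Notes on version B (the rewrite author's own statement) =====
-- stated objective: simpler
-- what changed: Replaced the stable length-descending sort plus first-match scan with a single linear max-tracking pass over the original choices (strict '>' so the earliest longest match wins).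
import Mathlib
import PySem

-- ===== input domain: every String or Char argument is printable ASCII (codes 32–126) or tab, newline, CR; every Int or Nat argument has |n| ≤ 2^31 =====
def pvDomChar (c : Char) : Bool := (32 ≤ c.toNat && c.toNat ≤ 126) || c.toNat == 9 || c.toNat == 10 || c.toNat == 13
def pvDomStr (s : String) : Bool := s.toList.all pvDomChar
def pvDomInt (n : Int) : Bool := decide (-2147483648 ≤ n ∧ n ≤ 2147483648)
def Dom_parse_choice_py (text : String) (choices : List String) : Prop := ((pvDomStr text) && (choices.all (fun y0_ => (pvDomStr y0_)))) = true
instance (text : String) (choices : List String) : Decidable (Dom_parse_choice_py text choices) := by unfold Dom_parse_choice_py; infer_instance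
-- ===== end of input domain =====

-- B replaces A's stable length-descending sort + first-match scan with one linear
-- max-tracking pass (strict '>', so the earliest longest substring match wins): simpler.

-- ===== PORT A =====
def parse_choice_py (text : String) (choices : List String) : Option String :=
  let low := PySem.Str.lower text
  -- Exact match first
  match choices.find? (fun choice => PySem.Str.lower choice == low) with
  | some choice => some choice
  | none =>
    -- Substring match — longest first
    let sorted_choices := PySem.List.sorted choices (fun c => PySem.Str.len c) true
    match sorted_choices.find? (fun choice => PySem.Str.isIn (PySem.Str.lower choice) low) with
    | some choice => some choice
    | none => some text

-- ===== PORT B =====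
-- first loop of Source B: return the first exact (case-insensitive) match
def pvExactScan (low : String) : List String → Option String
  | [] => none
  | c :: cs => if PySem.Str.lower c == low then c else pvExactScan low cs

-- second loop of Source B: max-tracking scan over the remaining choices
def pvBestScan (low : String) (best : Option String) (bestLen : Int) : List String → Option String
  | [] => best
  | c :: cs =>
    if decide (bestLen < PySem.Str.len c) && PySem.Str.isIn (PySem.Str.lower c) low then
      pvBestScan low (some c) (PySem.Str.len c) cs
    else
      pvBestScan low best bestLen cs

def parse_choice_py_alt (text : String) (choices : List String) : Option String :=
  let low := PySem.Str.lower text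
  match pvExactScan low choices with
  | some choice => some choice
  | none => some ((pvBestScan low none (-1) choices).getD text)

-- ===== PRECONDITION & SPEC =====
def Spec_parse_choice_py (text : String) (choices : List String) (out : Option String) : Prop := out = parse_choice_py_alt text choices
instance (text : String) (choices : List String) (out : Option String) : Decidable (Spec_parse_choice_py text choices out) := by unfold Spec_parse_choice_py; infer_instance

-- ===== CLAIM (what is proved, stated in full; the proofs are below) =====
def Claim_equal_parse_choice_py : Prop := ∀ (text : String) (choices : List String), Dom_parse_choice_py text choices → Spec_parse_choice_py text choices (parse_choice_py text choices)

-- ===== LEMMAS AND PROOFS =====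

-- The exact-match loops agree.
theorem pvExactScan_eq_find? (low : String) (l : List String) :
    pvExactScan low l = l.find? (fun c => PySem.Str.lower c == low) := by
  induction l with
  | nil => rfl
  | cons c cs ih =>
    by_cases h : PySem.Str.lower c = low
    · have hb : (PySem.Str.lower c == low) = true := beq_iff_eq.mpr h
      simp [pvExactScan, List.find?, hb]
    · have hb : (PySem.Str.lower c == low) = false := beq_eq_false_iff_ne.mpr h
      simp [pvExactScan, List.find?, hb, ih]

-- pvBestScan as a fold over a (best, bestLen) pair (for right-to-left induction).
def pvStep (low : String) (st : Option String × Int) (c : String) : Option String × Int :=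
  if decide (st.2 < PySem.Str.len c) && PySem.Str.isIn (PySem.Str.lower c) low then
    (some c, PySem.Str.len c)
  else st

theorem pvBestScan_eq_foldl (low : String) (l : List String) (b : Option String) (n : Int) :
    pvBestScan low b n l = (l.foldl (pvStep low) (b, n)).1 := by
  induction l generalizing b n with
  | nil => rfl
  | cons c cs ih =>
    simp only [pvBestScan, List.foldl, pvStep]
    split <;> simp_all

-- Inserting x into a length-descending list: its first substring match is x exactly
-- when x matches and is strictly longer than the old first match.
theorem pvFind_insertBy (low x : String) (s : List String)
    (hs : s.Pairwise (fun a b => PySem.Str.len b ≤ PySem.Str.len a)) :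
    (PySem.List.insertBy (fun a b => decide (PySem.Str.len b < PySem.Str.len a)) x s).find?
        (fun c => PySem.Str.isIn (PySem.Str.lower c) low) =
      match s.find? (fun c => PySem.Str.isIn (PySem.Str.lower c) low) with
      | some m =>
        if PySem.Str.isIn (PySem.Str.lower x) low && decide (PySem.Str.len m < PySem.Str.len x)
        then some x else some m
      | none =>
        if PySem.Str.isIn (PySem.Str.lower x) low then some x else none := by
  induction s with
  | nil =>
    simp only [PySem.List.insertBy, List.find?]
    split <;> simp_all
  | cons y ys ih =>
    rcases List.pairwise_cons.mp hs with ⟨hy, hys⟩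
    by_cases hlt : PySem.Str.len y < PySem.Str.len x
    · -- x is inserted at the front
      simp only [PySem.List.insertBy, hlt, decide_true, if_true]
      by_cases hx : PySem.Str.isIn (PySem.Str.lower x) low
      · rw [List.find?_cons_of_pos (by simpa using hx)]
        cases hfind : (y :: ys).find? (fun c => PySem.Str.isIn (PySem.Str.lower c) low) with
        | none => simp_all
        | some m =>
          have hm : m ∈ y :: ys := List.mem_of_find?_eq_some hfind
          have hmy : PySem.Str.len m ≤ PySem.Str.len y := by
            rcases List.mem_cons.mp hm with h | h
            · exact le_of_eq (by rw [h])
            · exact hy m h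
          have hmx : PySem.Str.len m < PySem.Str.len x := lt_of_le_of_lt hmy hlt
          simp only [PySem.Str.isIn_eq, PySem.Str.toList_lower] at hx
          simp only [PySem.Str.len_eq, String.length_toList, Nat.cast_lt] at hmx
          simp [hx, hmx]
      · rw [List.find?_cons_of_neg (by simpa using hx)]
        cases hfind : (y :: ys).find? (fun c => PySem.Str.isIn (PySem.Str.lower c) low) with
        | none => simp_all
        | some m => simp_all
    · -- x goes after y
      simp only [PySem.List.insertBy, hlt, decide_false, Bool.false_eq_true, if_false]
      by_cases hyP : PySem.Str.isIn (PySem.Str.lower y) low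
      · rw [List.find?_cons_of_pos (by simpa using hyP),
          List.find?_cons_of_pos (by simpa using hyP)]
        simp only [PySem.Str.len_eq, String.length_toList, Nat.cast_lt, not_lt] at hlt
        simp [hlt]
      · rw [List.find?_cons_of_neg (by simpa using hyP),
          List.find?_cons_of_neg (by simpa using hyP), ih hys]

-- The fold over the original list computes the first match of the length-descending sort.
theorem pvMain (low : String) (l : List String) :
    l.foldl (pvStep low) (none, -1) =
      match (PySem.List.sorted l (fun c => PySem.Str.len c) true).find?
          (fun c => PySem.Str.isIn (PySem.Str.lower c) low) with
      | some m => (some m, PySem.Str.len m)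
      | none => ((none : Option String), (-1 : Int)) := by
  induction l using List.reverseRecOn with
  | nil => rfl
  | append_singleton xs x ih =>
    have hsort : PySem.List.sorted (xs ++ [x]) (fun c => PySem.Str.len c) true =
        PySem.List.insertBy (fun a b => decide (PySem.Str.len b < PySem.Str.len a)) x
          (PySem.List.sorted xs (fun c => PySem.Str.len c) true) := by
      rw [PySem.List.sorted_rev_eq_foldl_insertBy, PySem.List.sorted_rev_eq_foldl_insertBy,
        List.foldl_append, List.foldl_cons, List.foldl_nil]
    have hpw := PySem.List.sorted_pairwise_rev xs (fun c => PySem.Str.len c)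
    rw [List.foldl_append, List.foldl_cons, List.foldl_nil, ih, hsort,
      pvFind_insertBy low x _ hpw]
    cases hfind : (PySem.List.sorted xs (fun c => PySem.Str.len c) true).find?
        (fun c => PySem.Str.isIn (PySem.Str.lower c) low) with
    | none =>
      by_cases hx : PySem.Str.isIn (PySem.Str.lower x) low
      · simp only [pvStep]
        simp only [PySem.Str.isIn_eq, PySem.Str.toList_lower] at hx
        simp [hx]
        omega
      · simp only [pvStep]
        simp only [PySem.Str.isIn_eq, PySem.Str.toList_lower] at hx
        simp [hx]
    | some m =>
      by_cases hx : PySem.Str.isIn (PySem.Str.lower x) low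
      · by_cases hlt : PySem.Str.len m < PySem.Str.len x
        · simp only [pvStep]
          simp only [PySem.Str.isIn_eq, PySem.Str.toList_lower] at hx
          simp only [PySem.Str.len_eq, String.length_toList, Nat.cast_lt] at hlt
          simp [hx, hlt]
        · simp only [pvStep]
          simp only [PySem.Str.isIn_eq, PySem.Str.toList_lower] at hx
          simp only [PySem.Str.len_eq, String.length_toList, Nat.cast_lt, not_lt] at hlt
          have hC : ¬ m.length < x.length := not_lt.mpr hlt
          simp [hx, hC]
      · simp only [pvStep]
        simp only [PySem.Str.isIn_eq, PySem.Str.toList_lower] at hx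
        simp [hx]

-- ===== VERDICT (by name: the statement is the Claim_ definition above) =====
theorem parse_choice_py_spec : Claim_equal_parse_choice_py := by
  intro text choices _
  unfold Spec_parse_choice_py
  simp only [parse_choice_py, parse_choice_py_alt, pvExactScan_eq_find?,
    pvBestScan_eq_foldl, pvMain]
  cases hex : choices.find? (fun c => PySem.Str.lower c == PySem.Str.lower text) with
  | some c => rfl
  | none =>
    cases hfind : (PySem.List.sorted choices (fun c => PySem.Str.len c) true).find?
        (fun c => PySem.Str.isIn (PySem.Str.lower c) (PySem.Str.lower text)) with
    | none => rfl
    | some m => rfl
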